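-- pv_equiv track=rewrite | github.com/wang-yu-hao/cost_benefit | util/Functions_behaviour.py | get_trial_side_details
-- ===== SOURCE A (Python) =====
-- def get_trial_side_details(center_out_to_side_ids, center_out_ids, choice_state_ids, stay_side_ids, init_id, ITI_id):
--     center_out_side_ids = [x for i, x in enumerate(center_out_ids) if x in center_out_to_side_ids]
--     choice_state_side_ids = [choice_state_ids[i] for i, x in enumerate(center_out_ids) if x in center_out_to_side_ids]
--     poke_side_in_ids = [stay_side_ids[i] for i, x in enumerate(center_out_to_side_ids) if x in center_out_side_ids]
--
--     real_choice_state_side_id = []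
--     real_side_in_id = []
--     trial_id_side = []
--     for i, x in enumerate(init_id):
--         temp_choice_state = [choice_state_side_ids[j] for j in range(len(choice_state_side_ids)) if init_id[i] < choice_state_side_ids[j] < ITI_id[i]]
--         temp_side_in = [poke_side_in_ids[j] for j in range(len(choice_state_side_ids)) if init_id[i] < choice_state_side_ids[j] < ITI_id[i]]
--         if temp_choice_state:
--             real_choice_state_side_id.append(temp_choice_state[0])
--             trial_id_side.append(i)
--         if temp_side_in:
--             real_side_in_id.append(temp_side_in[0])
--
--     trial_id_side = list(dict.fromkeys(trial_id_side)) #remove repeated values in list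
--
--     return center_out_side_ids, choice_state_side_ids, poke_side_in_ids, real_choice_state_side_id, real_side_in_id, trial_id_side
-- ===== SOURCE B (Python) =====
-- def get_trial_side_details(center_out_to_side_ids, center_out_ids, choice_state_ids, stay_side_ids, init_id, ITI_id):
--     cots_set = set(center_out_to_side_ids)
--     center_out_side_ids = []
--     choice_state_side_ids = []
--     for x, c in zip(center_out_ids, choice_state_ids):
--         if x in cots_set:
--             center_out_side_ids.append(x)
--             choice_state_side_ids.append(c)
--     coside_set = set(center_out_side_ids)
--     poke_side_in_ids = [s for x, s in zip(center_out_to_side_ids, stay_side_ids) if x in coside_set]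
--
--     # event-major stage: one pass over the events, filling a per-trial slot array
--     # (each trial keeps the first event falling inside its interval)
--     n = len(init_id)
--     slots = [None] * n
--     for j, v in enumerate(choice_state_side_ids):
--         slots = [((v, poke_side_in_ids[j]) if s is None and init_id[i] < v < ITI_id[i] else s)
--                  for i, s in enumerate(slots)]
--     real_choice_state_side_id = []
--     real_side_in_id = []
--     trial_id_side = []
--     for i, s in enumerate(slots):
--         if s is not None:
--             real_choice_state_side_id.append(s[0])
--             real_side_in_id.append(s[1])
--             trial_id_side.append(i)
--     return center_out_side_ids, choice_state_side_ids, poke_side_in_ids, real_choice_state_side_id, real_side_in_id, trial_id_side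
-- ===== Notes on version B (the rewrite author's own statement) =====
-- stated objective: alternative
-- what changed: Inverts the final stage from trial-major to event-major: instead of scanning the event list once per trial and taking the first in-interval element of two full temporary lists, B makes one pass over the events filling a per-trial slot array (None sentinel) and then reads the slots off in trial order, so the dedup of trial ids disappears; the first two filtered lists are built in a single zip pass with set membership.
import Mathlib
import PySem

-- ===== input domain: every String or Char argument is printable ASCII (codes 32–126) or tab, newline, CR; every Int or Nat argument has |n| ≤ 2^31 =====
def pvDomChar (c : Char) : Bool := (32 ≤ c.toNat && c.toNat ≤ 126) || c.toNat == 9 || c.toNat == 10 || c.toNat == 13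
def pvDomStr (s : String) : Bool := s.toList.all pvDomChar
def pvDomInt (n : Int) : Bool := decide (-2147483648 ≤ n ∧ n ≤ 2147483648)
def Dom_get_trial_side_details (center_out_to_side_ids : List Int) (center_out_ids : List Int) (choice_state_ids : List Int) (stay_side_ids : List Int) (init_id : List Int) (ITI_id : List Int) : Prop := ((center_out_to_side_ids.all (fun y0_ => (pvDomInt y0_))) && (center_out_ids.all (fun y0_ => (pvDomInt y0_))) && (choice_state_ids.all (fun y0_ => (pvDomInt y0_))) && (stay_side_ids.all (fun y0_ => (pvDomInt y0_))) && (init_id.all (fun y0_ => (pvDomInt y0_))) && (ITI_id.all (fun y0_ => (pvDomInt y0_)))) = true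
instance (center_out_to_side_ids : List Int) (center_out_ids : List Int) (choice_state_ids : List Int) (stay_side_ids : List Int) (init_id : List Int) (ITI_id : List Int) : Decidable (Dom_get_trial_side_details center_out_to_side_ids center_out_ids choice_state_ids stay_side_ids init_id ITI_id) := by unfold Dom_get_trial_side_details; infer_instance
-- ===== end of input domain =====

-- B inverts the trial loop: instead of scanning the event list once per trial and taking the
-- first in-interval event, it makes one event-major pass filling a per-trial slot array
-- (sentinel None = not yet found), then reads the slots off in trial order; the first two
-- filtered lists are built in one zip pass with set membership. Equivalence is claimed on
-- Pre_, exactly the inputs where the Python A raises no IndexError.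

-- ===== PORT A =====
def get_trial_side_details (center_out_to_side_ids : List Int) (center_out_ids : List Int) (choice_state_ids : List Int) (stay_side_ids : List Int) (init_id : List Int) (ITI_id : List Int) : List (List Int) :=
  let center_out_side_ids :=
    ((PySem.List.enumerate center_out_ids).filter (fun p => decide (p.2 ∈ center_out_to_side_ids))).map (fun p => p.2)
  let choice_state_side_ids :=
    ((PySem.List.enumerate center_out_ids).filter (fun p => decide (p.2 ∈ center_out_to_side_ids))).map
      (fun p => PySem.List.pyGetD choice_state_ids p.1 0)
  let poke_side_in_ids :=
    ((PySem.List.enumerate center_out_to_side_ids).filter (fun p => decide (p.2 ∈ center_out_side_ids))).map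
      (fun p => PySem.List.pyGetD stay_side_ids p.1 0)
  let st := (PySem.List.enumerate init_id).foldl
    (fun (st : List Int × List Int × List Int) p =>
      let idxs := (PySem.List.pyRange 0 (choice_state_side_ids.length : Int) 1).filter (fun j =>
        decide (PySem.List.pyGetD init_id p.1 0 < PySem.List.pyGetD choice_state_side_ids j 0 ∧
                PySem.List.pyGetD choice_state_side_ids j 0 < PySem.List.pyGetD ITI_id p.1 0))
      let temp_choice := idxs.map (fun j => PySem.List.pyGetD choice_state_side_ids j 0)
      let temp_side := idxs.map (fun j => PySem.List.pyGetD poke_side_in_ids j 0)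
      let st1 := if temp_choice ≠ [] then (st.1 ++ [PySem.List.pyGetD temp_choice 0 0], st.2.1, st.2.2 ++ [p.1]) else st
      let st2 := if temp_side ≠ [] then (st1.1, st1.2.1 ++ [PySem.List.pyGetD temp_side 0 0], st1.2.2) else st1
      st2)
    ([], [], [])
  [center_out_side_ids, choice_state_side_ids, poke_side_in_ids, st.1, st.2.1, PySem.List.dedup st.2.2]

-- ===== PORT B =====
-- Source B's slot-update comprehension: one event (j, v) stamped into every still-empty slot whose interval contains v
def pvUpdateSlots (init ITI poke : List Int) (slots : List (Option (Int × Int))) (j v : Int) : List (Option (Int × Int)) :=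
  (PySem.List.enumerate slots).map (fun p =>
    if p.2 = none ∧ PySem.List.pyGetD init p.1 0 < v ∧ v < PySem.List.pyGetD ITI p.1 0
    then some (v, PySem.List.pyGetD poke j 0) else p.2)

def get_trial_side_details_alt (center_out_to_side_ids : List Int) (center_out_ids : List Int) (choice_state_ids : List Int) (stay_side_ids : List Int) (init_id : List Int) (ITI_id : List Int) : List (List Int) :=
  let cotsSet := PySem.Set.ofList center_out_to_side_ids
  let pairs := (center_out_ids.zip choice_state_ids).foldl
    (fun (acc : List Int × List Int) q =>
      if PySem.Set.contains cotsSet q.1 then (acc.1 ++ [q.1], acc.2 ++ [q.2]) else acc)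
    ([], [])
  let center_out_side_ids := pairs.1
  let choice_state_side_ids := pairs.2
  let cosideSet := PySem.Set.ofList center_out_side_ids
  let poke_side_in_ids :=
    ((center_out_to_side_ids.zip stay_side_ids).filter (fun q => PySem.Set.contains cosideSet q.1)).map (fun q => q.2)
  let slots := (PySem.List.enumerate choice_state_side_ids).foldl
    (fun sl p => pvUpdateSlots init_id ITI_id poke_side_in_ids sl p.1 p.2)
    (List.replicate init_id.length none)
  let st := (PySem.List.enumerate slots).foldl
    (fun (st : List Int × List Int × List Int) p =>
      match p.2 with
      | some vw => (st.1 ++ [vw.1], st.2.1 ++ [vw.2], st.2.2 ++ [p.1])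
      | none => st)
    ([], [], [])
  [center_out_side_ids, choice_state_side_ids, poke_side_in_ids, st.1, st.2.1, st.2.2]

-- ===== PRECONDITION & SPEC =====
-- the list A calls choice_state_side_ids (a filtered projection of the inputs), used by Pre_ only
def pvChoiceSide (center_out_to_side_ids : List Int) (center_out_ids : List Int) (choice_state_ids : List Int) : List Int :=
  ((PySem.List.enumerate center_out_ids).filter (fun p => decide (p.2 ∈ center_out_to_side_ids))).map
    (fun p => PySem.List.pyGetD choice_state_ids p.1 0)

-- Pre_ is exactly the set of inputs on which the Python A returns normally: it excludes only the
-- inputs where A raises an IndexError (choice_state_ids / stay_side_ids / ITI_id / the poke list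
-- indexed out of range).
def Pre_get_trial_side_details (center_out_to_side_ids : List Int) (center_out_ids : List Int) (choice_state_ids : List Int) (stay_side_ids : List Int) (init_id : List Int) (ITI_id : List Int) : Prop :=
  (∀ p ∈ PySem.List.enumerate center_out_ids, p.2 ∈ center_out_to_side_ids → p.1 < (choice_state_ids.length : Int)) ∧
  (∀ p ∈ PySem.List.enumerate center_out_to_side_ids, p.2 ∈ center_out_ids → p.1 < (stay_side_ids.length : Int)) ∧
  (∀ q ∈ PySem.List.enumerate init_id,
      ((ITI_id.length : Int) ≤ q.1 →
        ∀ v ∈ pvChoiceSide center_out_to_side_ids center_out_ids choice_state_ids, ¬ q.2 < v) ∧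
      (∀ r ∈ PySem.List.enumerate (pvChoiceSide center_out_to_side_ids center_out_ids choice_state_ids),
        q.2 < r.2 ∧ r.2 < PySem.List.pyGetD ITI_id q.1 0 →
          r.1 < ((center_out_to_side_ids.filter (fun x => decide (x ∈ center_out_ids))).length : Int)))
instance (center_out_to_side_ids : List Int) (center_out_ids : List Int) (choice_state_ids : List Int) (stay_side_ids : List Int) (init_id : List Int) (ITI_id : List Int) : Decidable (Pre_get_trial_side_details center_out_to_side_ids center_out_ids choice_state_ids stay_side_ids init_id ITI_id) := by unfold Pre_get_trial_side_details; infer_instance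

def pvWitness_get_trial_side_details : List Int × List Int × List Int × List Int × List Int × List Int :=
  ([1, 2], [1, 3], [10], [5, 6], [0], [20])

def Spec_get_trial_side_details (center_out_to_side_ids : List Int) (center_out_ids : List Int) (choice_state_ids : List Int) (stay_side_ids : List Int) (init_id : List Int) (ITI_id : List Int) (out : List (List Int)) : Prop := out = get_trial_side_details_alt center_out_to_side_ids center_out_ids choice_state_ids stay_side_ids init_id ITI_id
instance (center_out_to_side_ids : List Int) (center_out_ids : List Int) (choice_state_ids : List Int) (stay_side_ids : List Int) (init_id : List Int) (ITI_id : List Int) (out : List (List Int)) : Decidable (Spec_get_trial_side_details center_out_to_side_ids center_out_ids choice_state_ids stay_side_ids init_id ITI_id out) := by unfold Spec_get_trial_side_details; infer_instance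

-- ===== CLAIM (what is proved, stated in full; the proofs are below) =====
def Claim_equal_get_trial_side_details : Prop := ∀ (center_out_to_side_ids : List Int) (center_out_ids : List Int) (choice_state_ids : List Int) (stay_side_ids : List Int) (init_id : List Int) (ITI_id : List Int), Dom_get_trial_side_details center_out_to_side_ids center_out_ids choice_state_ids stay_side_ids init_id ITI_id → Pre_get_trial_side_details center_out_to_side_ids center_out_ids choice_state_ids stay_side_ids init_id ITI_id → Spec_get_trial_side_details center_out_to_side_ids center_out_ids choice_state_ids stay_side_ids init_id ITI_id (get_trial_side_details center_out_to_side_ids center_out_ids choice_state_ids stay_side_ids init_id ITI_id)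

-- ===== LEMMAS AND PROOFS =====

-- proof-side recursion: the values cs[i] at the positions i of co whose element passes P
def pvSelSnd (P : Int → Bool) : List Int → List Int → List Int
  | [], _ => []
  | x :: co, cs => if P x then cs.getD 0 0 :: pvSelSnd P co cs.tail else pvSelSnd P co cs.tail

-- proof-side: the first event (j, v) of l with lo < v < ITI[i], as (v, poke[j])
def pvFindHit (poke ITI : List Int) (i lo : Int) : List (Int × Int) → Option (Int × Int)
  | [] => none
  | (j, v) :: rest =>
      if lo < v ∧ v < PySem.List.pyGetD ITI i 0 then some (v, PySem.List.pyGetD poke j 0)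
      else pvFindHit poke ITI i lo rest

-- proof-side: per-trial first-hit step (the common normal form of both loops)
def pvStepB (poke ITI Cs : List Int) (st : List Int × List Int × List Int) (p : Int × Int) : List Int × List Int × List Int :=
  match pvFindHit poke ITI p.1 p.2 (PySem.List.enumerate Cs) with
  | some (v, s) => (st.1 ++ [v], st.2.1 ++ [s], st.2.2 ++ [p.1])
  | none => st

lemma pvEnum_eq_map_range {α : Type} (d : α) (xs : List α) : ∀ s : Int,
    PySem.List.enumerate xs s = (List.range xs.length).map (fun k : Nat => (s + (k : Int), xs.getD k d)) := by
  induction xs with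
  | nil => intro s; simp [PySem.List.enumerate_nil]
  | cons x xs ih =>
      intro s
      rw [PySem.List.enumerate_cons, ih (s + 1)]
      simp only [List.length_cons]
      rw [List.range_succ_eq_map]
      simp only [List.map_cons, List.map_map]
      congr 1
      · simp
      · apply List.map_congr_left
        intro k _
        simp only [Function.comp, Nat.succ_eq_add_one, List.getD_cons_succ, Prod.ext_iff]
        constructor
        · push_cast; ring
        · trivial

lemma pvEnum_zero {α : Type} (d : α) (xs : List α) :
    PySem.List.enumerate xs = (List.range xs.length).map (fun k : Nat => ((k : Int), xs.getD k d)) := by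
  rw [show PySem.List.enumerate xs = PySem.List.enumerate xs 0 from rfl, pvEnum_eq_map_range d xs 0]
  apply List.map_congr_left
  intro k _
  simp

lemma pvSelA_fst (P : Int → Bool) (co : List Int) : ∀ s : Int,
    ((PySem.List.enumerate co s).filter (fun p => P p.2)).map (fun p => p.2) = co.filter P := by
  induction co with
  | nil => intro s; simp [PySem.List.enumerate_nil]
  | cons x co ih =>
      intro s
      rw [PySem.List.enumerate_cons]
      by_cases h : P x = true
      · simp [h, ih (s + 1)]
      · simp [h, ih (s + 1)]

lemma pvSelA_fst_zero (P : Int → Bool) (co : List Int) :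
    ((PySem.List.enumerate co).filter (fun p => P p.2)).map (fun p => p.2) = co.filter P :=
  pvSelA_fst P co 0

lemma pvSelA_snd (P : Int → Bool) (co : List Int) : ∀ (s : Nat) (cs : List Int),
    ((PySem.List.enumerate co (s : Int)).filter (fun p => P p.2)).map
      (fun p => PySem.List.pyGetD cs p.1 0) = pvSelSnd P co (cs.drop s) := by
  induction co with
  | nil => intro s cs; simp [PySem.List.enumerate_nil, pvSelSnd]
  | cons x co ih =>
      intro s cs
      have htail : (cs.drop s).tail = cs.drop (s + 1) := List.tail_drop
      have hhead : (cs.drop s).getD 0 0 = cs.getD s 0 := by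
        simp [List.getD_eq_getElem?_getD, List.getElem?_drop]
      have ih' := ih (s + 1) cs
      have hcast : ((s + 1 : Nat) : Int) = (s : Int) + 1 := by push_cast; ring
      rw [hcast] at ih'
      rw [PySem.List.enumerate_cons]
      by_cases h : P x = true
      · simp [h, ih', pvSelSnd, htail]
      · simp [h, ih', pvSelSnd, htail]

lemma pvSelA_snd_zero (P : Int → Bool) (co cs : List Int) :
    ((PySem.List.enumerate co).filter (fun p => P p.2)).map
      (fun p => PySem.List.pyGetD cs p.1 0) = pvSelSnd P co cs := by
  have h := pvSelA_snd P co 0 cs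
  simpa using h

lemma pvSelB (P : Int → Bool) (co : List Int) : ∀ cs : List Int,
    (∀ (i : Nat) (hi : i < co.length), P co[i] = true → i < cs.length) →
    ((co.zip cs).filter (fun q => P q.1)).map (fun q => q.1) = co.filter P ∧
    ((co.zip cs).filter (fun q => P q.1)).map (fun q => q.2) = pvSelSnd P co cs := by
  induction co with
  | nil => intro cs h; simp [pvSelSnd]
  | cons x co ih =>
      intro cs h
      cases cs with
      | nil =>
          have hx : ¬ P x = true := fun hP =>
            absurd (h 0 (by simp) (by simpa using hP)) (by simp)
          obtain ⟨h1, h2⟩ := ih [] (fun i hi hp => by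
            have h' := h (i + 1) (by simpa using Nat.succ_lt_succ hi) (by simpa using hp)
            simp only [List.length_nil] at h'; omega)
          simp only [List.zip_nil_right] at h1 h2 ⊢
          simp only [List.filter_nil, List.map_nil] at h1 h2 ⊢
          constructor
          · rw [List.filter_cons]; simp [hx, ← h1]
          · simp [pvSelSnd, hx, ← h2]
      | cons c cs' =>
          obtain ⟨h1, h2⟩ := ih cs' (fun i hi hp => by
            have h' := h (i + 1) (by simpa using Nat.succ_lt_succ hi) (by simpa using hp)
            simp only [List.length_cons] at h'; omega)
          by_cases hx : P x = true
          · simp [List.zip_cons_cons, hx, pvSelSnd, h1, h2]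
          · simp [List.zip_cons_cons, hx, pvSelSnd, h1, h2]

lemma pvContains_ofList (ys : List Int) (x : Int) :
    PySem.Set.contains (PySem.Set.ofList ys) x = decide (x ∈ ys) := by
  by_cases h : x ∈ ys
  · have hc : PySem.Set.contains (PySem.Set.ofList ys) x = true :=
      (PySem.Set.contains_iff (PySem.Set.ofList ys) x).mpr ((PySem.Set.mem_ofList ys x).mpr h)
    rw [hc]; simp [h]
  · have hc : PySem.Set.contains (PySem.Set.ofList ys) x = false := by
      cases hcc : PySem.Set.contains (PySem.Set.ofList ys) x
      · rfl
      · exact absurd ((PySem.Set.mem_ofList ys x).mp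
          ((PySem.Set.contains_iff (PySem.Set.ofList ys) x).mp hcc)) h
    rw [hc]; simp [h]

-- B's zip pass computes A's first two filtered lists
lemma pvPairsEq (cots co cs : List Int)
    (h : ∀ (i : Nat) (hi : i < co.length), decide (co[i] ∈ cots) = true → i < cs.length) :
    (co.zip cs).foldl
      (fun (acc : List Int × List Int) q =>
        if PySem.Set.contains (PySem.Set.ofList cots) q.1 then (acc.1 ++ [q.1], acc.2 ++ [q.2]) else acc)
      ([], [])
    = (co.filter (fun x => decide (x ∈ cots)), pvSelSnd (fun x => decide (x ∈ cots)) co cs) := by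
  have hsplit : (fun (acc : List Int × List Int) (q : Int × Int) =>
      if PySem.Set.contains (PySem.Set.ofList cots) q.1 then (acc.1 ++ [q.1], acc.2 ++ [q.2]) else acc)
      = (fun (acc : List Int × List Int) (q : Int × Int) =>
        ((fun (a : List Int) (q : Int × Int) => if decide (q.1 ∈ cots) then a ++ [q.1] else a) acc.1 q,
         (fun (a : List Int) (q : Int × Int) => if decide (q.1 ∈ cots) then a ++ [q.2] else a) acc.2 q)) := by
    funext acc q
    rw [pvContains_ofList]
    by_cases h' : q.1 ∈ cots <;> simp [h']
  rw [hsplit, PySem.List.foldl_prod_mk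
        (f := fun (a : List Int) (q : Int × Int) => if decide (q.1 ∈ cots) then a ++ [q.1] else a)
        (g := fun (a : List Int) (q : Int × Int) => if decide (q.1 ∈ cots) then a ++ [q.2] else a)]
  rw [PySem.List.foldl_append_if (p := fun q : Int × Int => decide (q.1 ∈ cots)) (f := fun q : Int × Int => q.1)]
  rw [PySem.List.foldl_append_if (p := fun q : Int × Int => decide (q.1 ∈ cots)) (f := fun q : Int × Int => q.2)]
  obtain ⟨h1, h2⟩ := pvSelB (fun x => decide (x ∈ cots)) co cs h
  simp only [List.nil_append]
  rw [h1, h2]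

-- B's poke pass computes A's third filtered list
lemma pvPokeBEq (cots co ss : List Int)
    (h : ∀ (i : Nat) (hi : i < cots.length),
        decide (cots[i] ∈ co.filter (fun x => decide (x ∈ cots))) = true → i < ss.length) :
    ((cots.zip ss).filter
        (fun q => PySem.Set.contains (PySem.Set.ofList (co.filter (fun x => decide (x ∈ cots)))) q.1)).map
      (fun q => q.2)
    = pvSelSnd (fun x => decide (x ∈ co.filter (fun x => decide (x ∈ cots)))) cots ss := by
  have hpred : (fun q : Int × Int =>
      PySem.Set.contains (PySem.Set.ofList (co.filter (fun x => decide (x ∈ cots)))) q.1)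
      = (fun q : Int × Int => decide (q.1 ∈ co.filter (fun x => decide (x ∈ cots)))) := by
    funext q; rw [pvContains_ofList]
  rw [hpred]
  exact (pvSelB (fun x => decide (x ∈ co.filter (fun x => decide (x ∈ cots)))) cots ss h).2

lemma pvFindHit_eq (poke ITI : List Int) (i lo : Int) (l : List (Int × Int)) :
    pvFindHit poke ITI i lo l =
      (l.find? (fun q => decide (lo < q.2 ∧ q.2 < PySem.List.pyGetD ITI i 0))).map
        (fun q => (q.2, PySem.List.pyGetD poke q.1 0)) := by
  induction l with
  | nil => simp [pvFindHit]
  | cons q rest ih =>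
      obtain ⟨j, v⟩ := q
      by_cases h : lo < v ∧ v < PySem.List.pyGetD ITI i 0
      · simp [pvFindHit, h]
      · simp [pvFindHit, h, ih]

-- A's trial loop equals the first-hit fold (same per-trial effect on the state)
lemma pvLoopEq (init ITI Cs poke : List Int) :
    (PySem.List.enumerate init).foldl
      (fun (st : List Int × List Int × List Int) p =>
        let idxs := (PySem.List.pyRange 0 (Cs.length : Int) 1).filter (fun j =>
          decide (PySem.List.pyGetD init p.1 0 < PySem.List.pyGetD Cs j 0 ∧
                  PySem.List.pyGetD Cs j 0 < PySem.List.pyGetD ITI p.1 0))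
        let temp_choice := idxs.map (fun j => PySem.List.pyGetD Cs j 0)
        let temp_side := idxs.map (fun j => PySem.List.pyGetD poke j 0)
        let st1 := if temp_choice ≠ [] then (st.1 ++ [PySem.List.pyGetD temp_choice 0 0], st.2.1, st.2.2 ++ [p.1]) else st
        let st2 := if temp_side ≠ [] then (st1.1, st1.2.1 ++ [PySem.List.pyGetD temp_side 0 0], st1.2.2) else st1
        st2)
      ([], [], [])
    = (PySem.List.enumerate init).foldl (pvStepB poke ITI Cs) ([], [], []) := by
  apply PySem.List.foldl_congr_mem
  intro st p hp
  rw [pvEnum_zero 0] at hp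
  obtain ⟨k0, _hk0, rfl⟩ := List.mem_map.mp hp
  simp only [pvStepB]
  rw [pvFindHit_eq, pvEnum_zero 0 Cs, List.find?_map]
  rw [PySem.List.pyRange_zero_nat, List.filter_map]
  simp only [List.map_map, Function.comp_def, PySem.List.pyGetD_natCast, Option.map_map]
  cases hF : List.find?
      (fun k => decide (init.getD k0 0 < Cs.getD k 0 ∧ Cs.getD k 0 < ITI.getD k0 0))
      (List.range Cs.length) with
  | none =>
      have hfil : (List.range Cs.length).filter
          (fun k => decide (init.getD k0 0 < Cs.getD k 0 ∧ Cs.getD k 0 < ITI.getD k0 0)) = [] :=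
        List.filter_eq_nil_iff.mpr (fun a ha => List.find?_eq_none.mp hF a ha)
      rw [hfil]
      simp
  | some j0 =>
      have hhead : (((List.range Cs.length).filter
          (fun k => decide (init.getD k0 0 < Cs.getD k 0 ∧ Cs.getD k 0 < ITI.getD k0 0)))).head? = some j0 := by
        rw [List.head?_filter, hF]
      cases hfc : (List.range Cs.length).filter
          (fun k => decide (init.getD k0 0 < Cs.getD k 0 ∧ Cs.getD k 0 < ITI.getD k0 0)) with
      | nil => rw [hfc] at hhead; cases hhead
      | cons a t =>
          rw [hfc] at hhead
          have ha : a = j0 := by simpa using hhead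
          subst ha
          simp [PySem.List.pyGetD_zero_cons]

-- the recorded trial ids of the first-hit fold: the hit trials, in index order
lemma pvThirdComp (poke ITI Cs : List Int) (l : List (Int × Int)) :
    ∀ acc : List Int × List Int × List Int,
      (l.foldl (pvStepB poke ITI Cs) acc).2.2 =
        acc.2.2 ++ (l.filter (fun p => (pvFindHit poke ITI p.1 p.2 (PySem.List.enumerate Cs)).isSome)).map
          (fun p => p.1) := by
  induction l with
  | nil => intro acc; simp
  | cons p l ih =>
      intro acc
      rw [List.foldl_cons, List.filter_cons]
      cases hf : pvFindHit poke ITI p.1 p.2 (PySem.List.enumerate Cs) with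
      | none => simp [pvStepB, hf, ih]
      | some vs =>
          obtain ⟨v, s⟩ := vs
          simp [pvStepB, hf, ih]

lemma pvTrialNodup (init ITI Cs poke : List Int) :
    (((PySem.List.enumerate init).foldl (pvStepB poke ITI Cs) ([], [], [])).2.2).Nodup := by
  rw [pvThirdComp]
  rw [pvEnum_zero 0 init, List.filter_map, List.map_map]
  simp only [List.nil_append]
  apply List.Nodup.map
  · intro a b hab
    simpa using hab
  · exact List.Nodup.filter _ List.nodup_range

lemma pvDedupTrial (init ITI Cs poke : List Int) :
    PySem.List.dedup (((PySem.List.enumerate init).foldl (pvStepB poke ITI Cs) ([], [], [])).2.2) =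
      ((PySem.List.enumerate init).foldl (pvStepB poke ITI Cs) ([], [], [])).2.2 := by
  rw [PySem.List.dedup_eq_ofList]
  exact PySem.Set.ofList_eq_self_of_nodup _ (pvTrialNodup init ITI Cs poke)

-- pointwise effect of one slot update
lemma pvUpdateSlots_getElem? (init ITI poke : List Int) (sl : List (Option (Int × Int))) (j v : Int) (k : Nat) :
    (pvUpdateSlots init ITI poke sl j v)[k]? =
      sl[k]?.map (fun s =>
        if s = none ∧ PySem.List.pyGetD init (k : Int) 0 < v ∧ v < PySem.List.pyGetD ITI (k : Int) 0
        then some (v, PySem.List.pyGetD poke j 0) else s) := by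
  simp only [pvUpdateSlots, List.getElem?_map, PySem.List.getElem?_enumerate]
  cases h : sl[k]? with
  | none => simp
  | some s => simp

lemma pvUpdateSlots_length (init ITI poke : List Int) (sl : List (Option (Int × Int))) (j v : Int) :
    (pvUpdateSlots init ITI poke sl j v).length = sl.length := by
  simp [pvUpdateSlots, PySem.List.length_enumerate]

-- the slot array after the event-major pass: slot k holds the first in-interval event for trial k
lemma pvSlots_char (init ITI poke : List Int) (l : List (Int × Int)) :
    ∀ (sl : List (Option (Int × Int))) (k : Nat),
      (l.foldl (fun s p => pvUpdateSlots init ITI poke s p.1 p.2) sl)[k]? =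
        sl[k]?.map (fun s0 =>
          match s0 with
          | some x => some x
          | none => pvFindHit poke ITI (k : Int) (PySem.List.pyGetD init (k : Int) 0) l) := by
  induction l with
  | nil =>
      intro sl k
      cases h : sl[k]? with
      | none => simp [h]
      | some s0 => cases s0 <;> simp [h, pvFindHit]
  | cons q l ih =>
      intro sl k
      rw [List.foldl_cons, ih]
      rw [pvUpdateSlots_getElem?]
      cases h : sl[k]? with
      | none => simp
      | some s0 =>
          cases s0 with
          | some x => simp [pvFindHit]
          | none =>
              obtain ⟨j, v⟩ := q
              simp only [Option.map_some, pvFindHit, true_and]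
              by_cases hc : PySem.List.pyGetD init (k : Int) 0 < v ∧ v < PySem.List.pyGetD ITI (k : Int) 0
              · rw [if_pos hc, if_pos hc]
              · rw [if_neg hc, if_neg hc]

lemma pvSlotsFold_length (init ITI poke : List Int) (l : List (Int × Int)) :
    ∀ sl : List (Option (Int × Int)),
      (l.foldl (fun s p => pvUpdateSlots init ITI poke s p.1 p.2) sl).length = sl.length := by
  induction l with
  | nil => intro sl; rfl
  | cons q l ih => intro sl; rw [List.foldl_cons, ih, pvUpdateSlots_length]

-- B's gather over the filled slots equals the first-hit fold over the trials
lemma pvGatherEq (init ITI Cs poke : List Int) :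
    (PySem.List.enumerate
        ((PySem.List.enumerate Cs).foldl (fun sl p => pvUpdateSlots init ITI poke sl p.1 p.2)
          (List.replicate init.length none))).foldl
      (fun (st : List Int × List Int × List Int) p =>
        match p.2 with
        | some vw => (st.1 ++ [vw.1], st.2.1 ++ [vw.2], st.2.2 ++ [p.1])
        | none => st)
      ([], [], [])
    = (PySem.List.enumerate init).foldl (pvStepB poke ITI Cs) ([], [], []) := by
  set slots := (PySem.List.enumerate Cs).foldl (fun sl p => pvUpdateSlots init ITI poke sl p.1 p.2)
    (List.replicate init.length none) with hslots
  have hlen : slots.length = init.length := by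
    rw [hslots, pvSlotsFold_length, List.length_replicate]
  have hsl : ∀ k : Nat, k < init.length →
      slots.getD k none = pvFindHit poke ITI (k : Int) (PySem.List.pyGetD init (k : Int) 0)
        (PySem.List.enumerate Cs) := by
    intro k hk
    have h := pvSlots_char init ITI poke (PySem.List.enumerate Cs) (List.replicate init.length none) k
    rw [← hslots] at h
    rw [List.getD_eq_getElem?_getD, h, List.getElem?_replicate]
    simp [hk]
  rw [pvEnum_zero none slots, pvEnum_zero 0 init, hlen, List.foldl_map, List.foldl_map]
  apply PySem.List.foldl_congr_mem
  intro st k hk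
  have hk' : k < init.length := List.mem_range.mp hk
  simp only [pvStepB]
  rw [hsl k hk']
  have hinit : PySem.List.pyGetD init (k : Int) 0 = init.getD k 0 := PySem.List.pyGetD_natCast init k 0
  rw [hinit]
  cases hf : pvFindHit poke ITI (k : Int) (init.getD k 0) (PySem.List.enumerate Cs) with
  | none => rfl
  | some vw => obtain ⟨v, w⟩ := vw; rfl

-- ===== VERDICT (by name: the statement is the Claim_ definition above) =====
theorem get_trial_side_details_spec : Claim_equal_get_trial_side_details := by
  intro cots co cs ss init ITI _hdom hpre
  obtain ⟨h1, h2, _h3⟩ := hpre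
  unfold Spec_get_trial_side_details
  have hm1 : ∀ (i : Nat) (hi : i < co.length), decide (co[i] ∈ cots) = true → i < cs.length := by
    intro i hi hp
    have hin : ((i : Int), co.getD i 0) ∈ PySem.List.enumerate co := by
      rw [pvEnum_zero 0]
      exact List.mem_map.mpr ⟨i, List.mem_range.mpr hi, rfl⟩
    have hgd : co.getD i 0 = co[i] := List.getD_eq_getElem _ _ hi
    have h' := h1 _ hin (by rw [hgd]; exact of_decide_eq_true hp)
    simp only [] at h'
    exact_mod_cast h'
  have hm2 : ∀ (i : Nat) (hi : i < cots.length),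
      decide (cots[i] ∈ co.filter (fun x => decide (x ∈ cots))) = true → i < ss.length := by
    intro i hi hp
    have hin : ((i : Int), cots.getD i 0) ∈ PySem.List.enumerate cots := by
      rw [pvEnum_zero 0]
      exact List.mem_map.mpr ⟨i, List.mem_range.mpr hi, rfl⟩
    have hgd : cots.getD i 0 = cots[i] := List.getD_eq_getElem _ _ hi
    have hmemco : cots[i] ∈ co := (List.mem_filter.mp (of_decide_eq_true hp)).1
    have h' := h2 _ hin (by rw [hgd]; exact hmemco)
    simp only [] at h'
    exact_mod_cast h'
  simp only [get_trial_side_details, get_trial_side_details_alt]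
  rw [pvPairsEq cots co cs hm1]
  rw [pvSelA_fst_zero (fun x => decide (x ∈ cots)) co]
  rw [pvSelA_snd_zero (fun x => decide (x ∈ cots)) co cs]
  rw [pvSelA_snd_zero (fun x => decide (x ∈ co.filter (fun x => decide (x ∈ cots)))) cots ss]
  rw [pvPokeBEq cots co ss hm2]
  rw [pvLoopEq init ITI (pvSelSnd (fun x => decide (x ∈ cots)) co cs)
        (pvSelSnd (fun x => decide (x ∈ co.filter (fun x => decide (x ∈ cots)))) cots ss)]
  rw [pvDedupTrial]
  rw [pvGatherEq]
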